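-- pv_equiv track=rewrite | github.com/BUAAJustin/HLEA | utils/functions.py | slice_element
-- ===== SOURCE A (Python) =====
-- def slice_element(element):
--     element_sliced_list = []
--     element_silced = []
--     max_position = 0
--     for i in range(len(element)):
--         max_position = max(max([j[1]+len(j[0]) for j in element[i]]), max_position)
--         element_silced.append(element[i])
--         if i == len(element) - 1 or max_position <= element[i + 1][0][1]:
--             element_sliced_list.append(element_silced)
--             element_silced = []
--     return element_sliced_list
-- ===== SOURCE B (Python) =====
-- def slice_element(element):
--     n = len(element)
--     reach = [max(pos + len(s) for s, pos in seg) for seg in element]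
--     pmax = []
--     m = 0
--     for r in reach:
--         m = max(m, r)
--         pmax.append(m)
--     cuts = [i + 1 for i in range(n) if i == n - 1 or pmax[i] <= element[i + 1][0][1]]
--     groups = []
--     start = 0
--     for c in cuts:
--         groups.append(element[start:c])
--         start = c
--     return groups
-- ===== Notes on version B (the rewrite author's own statement) =====
-- stated objective: alternative
-- what changed: Instead of one interleaved loop carrying a running max and a growing current group, B first materialises each segment's max reach and its prefix-maximum array, then computes the list of cut positions and builds the groups by slicing the input between consecutive cuts.
import Mathlib
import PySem

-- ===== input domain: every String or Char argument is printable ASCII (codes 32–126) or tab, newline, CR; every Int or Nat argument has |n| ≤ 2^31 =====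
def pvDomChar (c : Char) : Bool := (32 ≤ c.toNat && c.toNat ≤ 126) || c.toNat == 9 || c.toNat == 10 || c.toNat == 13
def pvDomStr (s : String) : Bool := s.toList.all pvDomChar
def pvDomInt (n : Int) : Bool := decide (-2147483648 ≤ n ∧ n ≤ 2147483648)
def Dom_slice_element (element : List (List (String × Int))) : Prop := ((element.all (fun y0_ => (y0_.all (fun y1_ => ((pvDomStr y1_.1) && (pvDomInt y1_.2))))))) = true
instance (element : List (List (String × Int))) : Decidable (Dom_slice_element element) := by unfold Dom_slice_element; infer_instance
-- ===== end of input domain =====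

-- B recomputes the same grouping by first materialising each segment's max reach and its prefix-maximum
-- array, then deriving the cut positions and slicing the input between consecutive cuts (objective:
-- alternative decomposition, same asymptotic cost).

-- ===== PORT A =====
-- loop body of A's for-loop, state = (element_sliced_list, element_silced, max_position)
def stepA (element : List (List (String × Int))) (n : Nat)
    (st : List (List (List (String × Int))) × List (List (String × Int)) × Int) (i : Nat) :
    List (List (List (String × Int))) × List (List (String × Int)) × Int :=
  let seg := (PySem.List.pyGet? element (i : Int)).getD []
  let mp := max ((PySem.List.max? (seg.map (fun j => j.2 + PySem.Str.len j.1)) (fun y => y)).getD 0) st.2.2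
  let cur := st.2.1 ++ [seg]
  if i = n - 1 ∨ mp ≤ ((PySem.List.pyGet? ((PySem.List.pyGet? element ((i : Int) + 1)).getD []) 0).getD ("", 0)).2 then
    (st.1 ++ [cur], [], mp)
  else (st.1, cur, mp)

def slice_element (element : List (List (String × Int))) : List (List (List (String × Int))) :=
  ((List.range element.length).foldl (stepA element element.length) ([], [], 0)).1

-- ===== PORT B =====
-- max(pos + len(s) for s, pos in seg)  (0 only outside Pre_, where Python raises)
def segReach (seg : List (String × Int)) : Int :=
  (PySem.List.max? (seg.map (fun j => j.2 + PySem.Str.len j.1)) (fun y => y)).getD 0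

-- the cut test: i == n - 1 or pmax[i] <= element[i + 1][0][1]
def bCond (element : List (List (String × Int))) (n : Nat) (pmax : List Int) (i : Nat) : Bool :=
  decide (i = n - 1 ∨ (PySem.List.pyGet? pmax (i : Int)).getD 0 ≤
    ((PySem.List.pyGet? ((PySem.List.pyGet? element ((i : Int) + 1)).getD []) 0).getD ("", 0)).2)

def slice_element_alt (element : List (List (String × Int))) : List (List (List (String × Int))) :=
  let n := element.length
  let reach := element.map segReach
  let pmax := (reach.foldl (fun (acc : List Int × Int) r => (acc.1 ++ [max acc.2 r], max acc.2 r)) ([], 0)).1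
  let cuts := ((List.range n).filter (fun i => bCond element n pmax i)).map (fun i => i + 1)
  (cuts.foldl (fun (acc : List (List (List (String × Int))) × Nat) (c : Nat) =>
      (acc.1 ++ [PySem.List.slice element (some (acc.2 : Int)) (some (c : Int))], c)) ([], 0)).1

-- ===== PRECONDITION & SPEC =====
-- Pre_ excludes inputs containing an empty inner segment: there Python A raises
-- (ValueError from max() on an empty list, or IndexError on element[i+1][0]).
def Pre_slice_element (element : List (List (String × Int))) : Prop :=
  ∀ seg ∈ element, seg ≠ []
instance (element : List (List (String × Int))) : Decidable (Pre_slice_element element) := by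
  unfold Pre_slice_element; infer_instance
def pvWitness_slice_element : (List (List (String × Int))) := [[("ab", 0)], [("c", 5)]]

def Spec_slice_element (element : List (List (String × Int))) (out : List (List (List (String × Int)))) : Prop := out = slice_element_alt element
instance (element : List (List (String × Int))) (out : List (List (List (String × Int)))) : Decidable (Spec_slice_element element out) := by unfold Spec_slice_element; infer_instance

-- ===== CLAIM (what is proved, stated in full; the proofs are below) =====
def Claim_equal_slice_element : Prop := ∀ (element : List (List (String × Int))), Dom_slice_element element → Pre_slice_element element → Spec_slice_element element (slice_element element)

-- ===== LEMMAS AND PROOFS =====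

-- element[i+1][0][1] with default, as both loop bodies read it
def startOf (seg : List (String × Int)) : Int :=
  ((PySem.List.pyGet? seg 0).getD ("", 0)).2

-- the common grouping spec: process segments left to right carrying the running max reach
def chunks (mp : Int) : List (List (String × Int)) → List (List (List (String × Int)))
  | [] => []
  | s :: rest =>
    match rest with
    | [] => [[s]]
    | t :: _ =>
      if max (segReach s) mp ≤ startOf t then [s] :: chunks (max (segReach s) mp) rest
      else
        match chunks (max (segReach s) mp) rest with
        | [] => [[s]]
        | g :: gs => (s :: g) :: gs

-- prepend a pending partial group onto the first chunk
def glue (cur : List (List (String × Int))) : List (List (List (String × Int))) → List (List (List (String × Int)))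
  | [] => []
  | g :: gs => (cur ++ g) :: gs

def pmaxList (m : Int) : List Int → List Int
  | [] => []
  | r :: rs => max m r :: pmaxList (max m r) rs

theorem glue_nil (gs : List (List (List (String × Int)))) : glue [] gs = gs := by
  cases gs <;> simp [glue]

theorem chunks_ne_nil (mp : Int) (s : List (String × Int)) (rest : List (List (String × Int))) :
    chunks mp (s :: rest) ≠ [] := by
  cases rest with
  | nil => simp [chunks]
  | cons t ts =>
    simp only [chunks]
    split
    · simp
    · split <;> simp

theorem pmaxFold (rs : List Int) : ∀ (acc : List Int) (m : Int),
    rs.foldl (fun (acc : List Int × Int) r => (acc.1 ++ [max acc.2 r], max acc.2 r)) (acc, m)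
      = (acc ++ pmaxList m rs, rs.foldl max m) := by
  induction rs with
  | nil => intro acc m; simp [pmaxList]
  | cons r rs ih => intro acc m; simp [List.foldl, pmaxList, ih]

theorem pmaxList_append (a b : List Int) : ∀ m,
    pmaxList m (a ++ b) = pmaxList m a ++ pmaxList (a.foldl max m) b := by
  induction a with
  | nil => intro m; simp [pmaxList]
  | cons r rs ih => intro m; simp [pmaxList, ih, List.foldl]

theorem pmaxList_length (rs : List Int) : ∀ m, (pmaxList m rs).length = rs.length := by
  induction rs with
  | nil => intro m; rfl
  | cons r rs ih => intro m; simp [pmaxList, ih]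

theorem slice_snoc (pre rest : List (List (String × Int))) (s : List (String × Int))
    (k0 : Nat) (hk0 : k0 ≤ pre.length) :
    PySem.List.slice (pre ++ s :: rest) (some (k0 : Int)) (some ((pre.length + 1 : Nat) : Int))
      = PySem.List.slice (pre ++ s :: rest) (some (k0 : Int)) (some ((pre.length : Nat) : Int)) ++ [s] := by
  rw [PySem.List.slice_natCast, PySem.List.slice_natCast]
  rw [List.drop_append_of_le_length hk0]
  have hlen : (pre.drop k0).length = pre.length - k0 := by simp
  rw [List.take_append, List.take_append]
  have h1 : pre.length + 1 - k0 - (pre.drop k0).length = 1 := by omega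
  have h2 : pre.length - k0 - (pre.drop k0).length = 0 := by omega
  have h3 : (pre.drop k0).take (pre.length + 1 - k0) = pre.drop k0 :=
    List.take_of_length_le (by omega)
  have h4 : (pre.drop k0).take (pre.length - k0) = pre.drop k0 :=
    List.take_of_length_le (by omega)
  rw [h1, h2, h3, h4]
  simp

theorem segReach_def (s : List (String × Int)) :
    (PySem.List.max? (s.map (fun j => j.2 + PySem.Str.len j.1)) (fun y => y)).getD 0 = segReach s := rfl

theorem startOf_def (t : List (String × Int)) :
    ((PySem.List.pyGet? t 0).getD ("", 0)).2 = startOf t := rfl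

theorem chunks_cons_cons (m0 : Int) (s t : List (String × Int)) (ts : List (List (String × Int))) :
    chunks m0 (s :: t :: ts) =
      if max (segReach s) m0 ≤ startOf t then [s] :: chunks (max (segReach s) m0) (t :: ts)
      else
        match chunks (max (segReach s) m0) (t :: ts) with
        | [] => [[s]]
        | g :: gs => (s :: g) :: gs := rfl

theorem next_getD (pre rest : List (List (String × Int))) (s t : List (String × Int))
    (h : rest = t :: rest.tail) :
    (PySem.List.pyGet? (pre ++ s :: rest) ((pre.length : Int) + 1)).getD [] = t := by
  have h2 : pre ++ s :: rest = (pre ++ [s]) ++ t :: rest.tail := by rw [h]; simp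
  have h3 : ((pre.length : Int) + 1) = (((pre ++ [s]).length : Nat) : Int) := by simp
  rw [h2, h3, PySem.List.pyGet?_append_length]
  rfl

theorem A_run (l : List (List (String × Int))) : ∀ (pre : List (List (String × Int)))
    (out : List (List (List (String × Int)))) (cur : List (List (String × Int))) (m0 : Int),
    ((List.range' pre.length l.length).foldl (stepA (pre ++ l) (pre ++ l).length) (out, cur, m0)).1
      = out ++ glue cur (chunks m0 l) := by
  induction l with
  | nil => intro pre out cur m0; simp [chunks, glue]
  | cons s rest ih =>
    intro pre out cur m0
    have hseg : (PySem.List.pyGet? (pre ++ s :: rest) ((pre.length : Nat) : Int)).getD [] = s := by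
      rw [PySem.List.pyGet?_append_length]; rfl
    rw [List.length_cons, List.range'_succ, List.foldl_cons]
    cases rest with
    | nil =>
      have hcond : pre.length = (pre ++ [s]).length - 1 := by simp
      simp only [stepA, hseg, segReach_def]
      rw [if_pos (Or.inl hcond)]
      simp [chunks, glue]
    | cons t ts =>
      have hne : ¬ pre.length = (pre ++ s :: t :: ts).length - 1 := by simp
      have hnext := next_getD pre (t :: ts) s t rfl
      have ih' := fun out' cur' m0' => ih (pre ++ [s]) out' cur' m0'
      simp only [List.append_assoc, List.singleton_append, List.length_append,
        List.length_cons, List.length_nil] at ih'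
      simp only [stepA, hseg, hnext, segReach_def, startOf_def]
      by_cases hc : max (segReach s) m0 ≤ startOf t
      · rw [if_pos (Or.inr hc)]
        have := ih' (out ++ [cur ++ [s]]) [] (max (segReach s) m0)
        simp only [List.length_append, List.length_cons, List.length_nil, Nat.zero_add,
          Nat.add_zero] at this ⊢
        rw [this, chunks_cons_cons, if_pos hc, glue_nil]
        simp [glue]
      · rw [if_neg (by rintro (h | h) <;> [exact hne h; exact hc h])]
        have := ih' out (cur ++ [s]) (max (segReach s) m0)
        simp only [List.length_append, List.length_cons, List.length_nil, Nat.zero_add,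
          Nat.add_zero] at this ⊢
        rw [this, chunks_cons_cons, if_neg hc]
        obtain ⟨g, gs, hg⟩ : ∃ g gs, chunks (max (segReach s) m0) (t :: ts) = g :: gs := by
          cases h : chunks (max (segReach s) m0) (t :: ts) with
          | nil => exact absurd h (chunks_ne_nil _ _ _)
          | cons g gs => exact ⟨g, gs, rfl⟩
        rw [hg]
        simp [glue]

theorem pmax_get (pre rest : List (List (String × Int))) (s : List (String × Int)) :
    (PySem.List.pyGet? (pmaxList 0 ((pre ++ s :: rest).map segReach)) ((pre.length : Nat) : Int)).getD 0
      = max ((pre.map segReach).foldl max 0) (segReach s) := by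
  rw [List.map_append, List.map_cons, pmaxList_append, pmaxList]
  have hlen : (pmaxList 0 (pre.map segReach)).length = pre.length := by
    rw [pmaxList_length, List.length_map]
  rw [← hlen, PySem.List.pyGet?_append_length]
  rfl

theorem B_run (l : List (List (String × Int))) : ∀ (pre : List (List (String × Int)))
    (k0 : Nat) (acc : List (List (List (String × Int)))), k0 ≤ pre.length →
    ((((List.range' pre.length l.length).filter
        (fun i => bCond (pre ++ l) (pre ++ l).length (pmaxList 0 ((pre ++ l).map segReach)) i)).map
          (fun i => i + 1)).foldl
      (fun (acc : List (List (List (String × Int))) × Nat) (c : Nat) =>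
        (acc.1 ++ [PySem.List.slice (pre ++ l) (some (acc.2 : Int)) (some (c : Int))], c)) (acc, k0)).1
      = acc ++ glue (PySem.List.slice (pre ++ l) (some (k0 : Int)) (some ((pre.length : Nat) : Int)))
          (chunks ((pre.map segReach).foldl max 0) l) := by
  induction l with
  | nil => intro pre k0 acc _; simp [chunks, glue]
  | cons s rest ih =>
    intro pre k0 acc hk0
    have hpm := pmax_get pre rest s
    rw [List.length_cons, List.range'_succ, List.filter_cons]
    cases rest with
    | nil =>
      have hct : bCond (pre ++ [s]) (pre ++ [s]).length
          (pmaxList 0 ((pre ++ [s]).map segReach)) pre.length = true := by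
        simp only [bCond, decide_eq_true_eq]
        exact Or.inl (by simp)
      rw [hct]
      simp only [if_true, List.length_nil, List.range'_zero, List.filter_nil, List.map_cons,
        List.map_nil, List.foldl_cons, List.foldl_nil]
      have hs := slice_snoc pre [] s k0 hk0
      simp only [List.append_nil] at hs
      push_cast at hs
      simp [chunks, glue, hs]
    | cons t ts =>
      have hne : ¬ pre.length = (pre ++ s :: t :: ts).length - 1 := by simp
      have hnext : ((PySem.List.pyGet? ((PySem.List.pyGet? (pre ++ s :: t :: ts)
          ((pre.length : Int) + 1)).getD []) 0).getD ("", 0)).2 = startOf t := by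
        rw [next_getD pre (t :: ts) s t rfl]; rfl
      have hfold : List.foldl max 0 (List.map segReach (pre ++ [s]))
          = max (segReach s) (List.foldl max 0 (List.map segReach pre)) := by
        simp
        exact max_comm _ _
      have ih' := fun k0' acc' h' => ih (pre ++ [s]) k0' acc' h'
      simp only [List.append_assoc, List.singleton_append, List.length_append,
        List.length_cons, List.length_nil, Nat.zero_add, Nat.add_zero, hfold] at ih'
      by_cases hc : max (segReach s) (List.foldl max 0 (List.map segReach pre)) ≤ startOf t
      · have hct : bCond (pre ++ s :: t :: ts) (pre ++ s :: t :: ts).length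
            (pmaxList 0 ((pre ++ s :: t :: ts).map segReach)) pre.length = true := by
          simp only [bCond, decide_eq_true_eq]
          exact Or.inr (by rw [hpm, hnext, max_comm]; exact hc)
        rw [hct]
        simp only [if_true, List.map_cons, List.foldl_cons]
        have := ih' (pre.length + 1) (acc ++ [PySem.List.slice (pre ++ s :: t :: ts)
          (some (k0 : Int)) (some ((pre.length + 1 : Nat) : Int))]) (by omega)
        simp only [List.length_append, List.length_cons, List.length_nil, Nat.zero_add,
          Nat.add_zero] at this ⊢
        rw [this]
        have hz : PySem.List.slice (pre ++ s :: t :: ts) (some ((pre.length + 1 : Nat) : Int))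
            (some ((pre.length + 1 : Nat) : Int)) = [] := by
          rw [PySem.List.slice_natCast]; simp
        rw [hz, glue_nil, chunks_cons_cons, if_pos hc]
        rw [slice_snoc pre (t :: ts) s k0 hk0]
        simp [glue]
      · have hcf : bCond (pre ++ s :: t :: ts) (pre ++ s :: t :: ts).length
            (pmaxList 0 ((pre ++ s :: t :: ts).map segReach)) pre.length = false := by
          simp only [bCond, decide_eq_false_iff_not]
          rintro (h | h)
          · exact hne h
          · rw [hpm, hnext, max_comm] at h; exact hc h
        rw [hcf]
        simp only [if_false, Bool.false_eq_true]
        have := ih' k0 acc (by omega)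
        simp only [List.length_append, List.length_cons, List.length_nil, Nat.zero_add,
          Nat.add_zero] at this ⊢
        rw [this, chunks_cons_cons, if_neg hc]
        obtain ⟨g, gs, hg⟩ : ∃ g gs,
            chunks (max (segReach s) (List.foldl max 0 (List.map segReach pre))) (t :: ts)
              = g :: gs := by
          cases h : chunks (max (segReach s) (List.foldl max 0 (List.map segReach pre))) (t :: ts) with
          | nil => exact absurd h (chunks_ne_nil _ _ _)
          | cons g gs => exact ⟨g, gs, rfl⟩
        rw [hg]
        rw [slice_snoc pre (t :: ts) s k0 hk0]
        simp [glue]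

-- ===== VERDICT (by name: the statement is the Claim_ definition above) =====
theorem slice_element_spec : Claim_equal_slice_element := by
  unfold Claim_equal_slice_element
  intro element _ _
  unfold Spec_slice_element slice_element slice_element_alt
  simp only [pmaxFold, List.nil_append]
  have hA := A_run element [] [] [] 0
  have hB := B_run element [] 0 [] (by simp)
  simp only [List.nil_append, List.length_nil, ← List.range_eq_range'] at hA hB
  rw [hA, hB]
  simp only [List.map_nil, List.foldl_nil] at hB
  have hz : PySem.List.slice element (some ((0 : Nat) : Int)) (some ((0 : Nat) : Int)) = [] := by
    rw [PySem.List.slice_natCast]; simp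
  rw [hz, glue_nil, glue_nil]
  simp
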